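-- pv_equiv track=rewrite | github.com/Nyasita/coursework_miniproject | gene_finder.py | rest_of_ORF
-- ===== SOURCE A (Python) =====
-- def rest_of_ORF(dna):
--     """ Takes a DNA sequence that is assumed to begin with a start
--         codon and returns the sequence up to but not including the
--         first in frame stop codon.  If there is no in frame stop codon,
--         returns the whole string.
--
--         dna: a DNA sequence
--         returns: the open reading frame represented as a string
--     >>> rest_of_ORF("ATGTGAA")
--     'ATG'
--     >>> rest_of_ORF("ATGAGATAGG")
--     'ATGAGA'
--     """
--
--     Orf = [] #Start an empty list to store the Orf
--     for codon in range(0, len(dna), 3 ): #split the entire dna in blocks of 3 which is a codon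
--         Orf.append( dna[0+int(codon):3+int(codon)] ) #append the codons in the orf list
--
--     StopCodons = [] #start an empty list to store stop codons found in the Orf
--     stops = ['TAG', 'TAA', 'TGA']
--     for StopCodon in stops:
--         if StopCodon in Orf:
--                 StopCodons.append(StopCodon)
--
--     indexs_stops = [] #Start an empty list to store the index of each stop codon found
--     for i in StopCodons:
--         indexs_stops.append(int(Orf.index(i)))
--     sorted_indexs_stops = sorted(indexs_stops) #Sorts the stop codons so that once the first one is found the iteration stops there
--
--     start = (Orf.index("ATG")) #Return first index of ATG found
--
--     if len(sorted_indexs_stops) >= 1: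
--         stop = sorted_indexs_stops[0] #the only considered stop codon is the first one that is found i.e at index 0
--         return "".join(Orf[start:stop]) #returns a string that starts from the start to the stop codon
--     else:
--         return "".join(Orf[start:]) #returns a string that starts from the start to the end of dna
--     pass
-- ===== SOURCE B (Python) =====
-- def rest_of_ORF(dna):
--     codons = [dna[i:i+3] for i in range(0, len(dna), 3)]
--     start = codons.index('ATG')  # ValueError when there is no in-frame ATG, same as A
--     for j, codon in enumerate(codons):
--         if codon in ('TAG', 'TAA', 'TGA'):
--             return ''.join(codons[start:j])
--     return ''.join(codons[start:])
-- ===== Notes on version B (the rewrite author's own statement) =====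
-- stated objective: simpler
-- what changed: Replaces A's three separate .index scans, filter list, sort and min-extraction with a single short-circuiting forward scan over enumerate(codons) that returns at the first in-frame stop codon.
import Mathlib
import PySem

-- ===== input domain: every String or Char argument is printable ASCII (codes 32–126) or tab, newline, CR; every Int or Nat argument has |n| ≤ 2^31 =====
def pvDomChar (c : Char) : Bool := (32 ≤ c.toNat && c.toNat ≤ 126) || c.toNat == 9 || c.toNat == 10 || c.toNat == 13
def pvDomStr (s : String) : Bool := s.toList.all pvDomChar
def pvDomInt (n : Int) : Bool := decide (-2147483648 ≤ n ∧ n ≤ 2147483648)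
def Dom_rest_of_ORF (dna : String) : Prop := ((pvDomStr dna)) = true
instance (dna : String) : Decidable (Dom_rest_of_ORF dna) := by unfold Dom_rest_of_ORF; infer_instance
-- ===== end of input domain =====

-- B replaces A's three .index scans + sort + min with one short-circuiting forward scan (simpler).
-- Both raise ValueError when no in-frame 'ATG' exists; Pre_ excludes exactly those inputs.

-- ===== PORT A =====
def pvStops : List String := ["TAG", "TAA", "TGA"]

def rest_of_ORF (dna : String) : String :=
  let Orf : List String :=
    (PySem.List.pyRange 0 (PySem.Str.len dna) 3).foldl
      (fun acc codon => acc ++ [PySem.Str.slice dna (some (0 + codon)) (some (3 + codon))]) []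
  let StopCodons : List String :=
    pvStops.foldl (fun acc s => if s ∈ Orf then acc ++ [s] else acc) []
  let indexs_stops : List Int :=
    StopCodons.foldl (fun acc i => acc ++ [(((PySem.List.index? Orf i).getD 0 : Nat) : Int)]) []
  let sorted_indexs_stops := PySem.List.sorted indexs_stops (fun x => x) false
  match PySem.List.index? Orf "ATG" with
  | none => ""   -- Python raises ValueError here; excluded by Pre_
  | some start =>
    if sorted_indexs_stops.length ≥ 1 then
      PySem.Str.join "" (PySem.List.slice Orf (some (start : Int))
        (some (PySem.List.pyGetD sorted_indexs_stops (0 : Int) 0)))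
    else
      PySem.Str.join "" (PySem.List.slice Orf (some (start : Int)) none)

-- ===== PORT B =====
-- first index whose codon is a stop codon (the enumerate scan of Source B)
def pvFindStop : List String → Option Nat
  | [] => none
  | c :: rest => if c ∈ pvStops then some 0 else (pvFindStop rest).map (· + 1)

def rest_of_ORF_alt (dna : String) : String :=
  let codons : List String :=
    (PySem.List.pyRange 0 (PySem.Str.len dna) 3).map
      (fun i => PySem.Str.slice dna (some i) (some (i + 3)))
  match PySem.List.index? codons "ATG" with
  | none => ""   -- Python raises ValueError here; excluded by Pre_
  | some start =>
    match pvFindStop codons with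
    | some j => PySem.Str.join "" (PySem.List.slice codons (some (start : Int)) (some (j : Int)))
    | none => PySem.Str.join "" (PySem.List.slice codons (some (start : Int)) none)

-- ===== PRECONDITION & SPEC =====
-- Pre_ excludes exactly the inputs on which A raises ValueError (no in-frame 'ATG' codon).
def Pre_rest_of_ORF (dna : String) : Prop :=
  "ATG" ∈ (PySem.List.pyRange 0 (PySem.Str.len dna) 3).map
      (fun i => PySem.Str.slice dna (some i) (some (i + 3)))
instance (dna : String) : Decidable (Pre_rest_of_ORF dna) := by unfold Pre_rest_of_ORF; infer_instance

def pvWitness_rest_of_ORF : String := "ATGTGAA"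

def Spec_rest_of_ORF (dna : String) (out : String) : Prop := out = rest_of_ORF_alt dna
instance (dna : String) (out : String) : Decidable (Spec_rest_of_ORF dna out) := by unfold Spec_rest_of_ORF; infer_instance

-- ===== CLAIM (what is proved, stated in full; the proofs are below) =====
def Claim_equal_rest_of_ORF : Prop := ∀ (dna : String), Dom_rest_of_ORF dna → Pre_rest_of_ORF dna → Spec_rest_of_ORF dna (rest_of_ORF dna)

-- ===== LEMMAS AND PROOFS =====

lemma pv_foldl_push {α β : Type} (l : List α) (f : α → β) (acc : List β) :
    l.foldl (fun a x => a ++ [f x]) acc = acc ++ l.map f := by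
  induction l generalizing acc with
  | nil => simp
  | cons x t ih => simp [ih]

lemma pv_foldl_filter {α : Type} (l : List α) (p : α → Prop) [DecidablePred p] (acc : List α) :
    l.foldl (fun a x => if p x then a ++ [x] else a) acc = acc ++ l.filter (fun x => decide (p x)) := by
  induction l generalizing acc with
  | nil => simp
  | cons x t ih => by_cases h : p x <;> simp [h, ih]

lemma pvFindStop_none (l : List String) (h : pvFindStop l = none) :
    ∀ c ∈ l, c ∉ pvStops := by
  induction l with
  | nil => simp
  | cons c t ih =>
    intro x hx
    by_cases hc : c ∈ pvStops
    · simp [pvFindStop, hc] at h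
    · rcases List.mem_cons.mp hx with hx | hx
      · exact hx ▸ hc
      · cases hm : pvFindStop t with
        | none => exact ih hm x hx
        | some k => simp [pvFindStop, hc, hm] at h

lemma pvFindStop_some (l : List String) (j : Nat) (h : pvFindStop l = some j) :
    ∃ (hj : j < l.length), l[j] ∈ pvStops ∧ ∀ i (hi : i < j), l[i]'(by omega) ∉ pvStops := by
  induction l generalizing j with
  | nil => simp [pvFindStop] at h
  | cons c t ih =>
    simp only [pvFindStop] at h
    split_ifs at h with hc
    · cases h
      exact ⟨by simp, by simpa using hc, by omega⟩
    · cases hm : pvFindStop t with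
      | none => simp [hm] at h
      | some j' =>
        simp [hm] at h
        subst h
        obtain ⟨hj', hmem, hlt⟩ := ih j' hm
        refine ⟨by simpa using Nat.succ_lt_succ hj', by simpa using hmem, ?_⟩
        intro i hi
        cases i with
        | zero => simpa using hc
        | succ i' => simpa using hlt i' (by omega)


def pvIdxs (L : List String) : List Int :=
  (pvStops.foldl (fun acc s => if s ∈ L then acc ++ [s] else acc) []).foldl
    (fun acc i => acc ++ [(((PySem.List.index? L i).getD 0 : Nat) : Int)]) []

lemma pvIdxs_eq (L : List String) :
    pvIdxs L = (pvStops.filter (fun s => decide (s ∈ L))).map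
      (fun s => (((PySem.List.index? L s).getD 0 : Nat) : Int)) := by
  unfold pvIdxs
  rw [pv_foldl_filter, pv_foldl_push]
  simp

lemma pvIdxs_nil (L : List String) (h : pvFindStop L = none) : pvIdxs L = [] := by
  rw [pvIdxs_eq]
  have hf : pvStops.filter (fun s => decide (s ∈ L)) = [] := by
    rw [List.filter_eq_nil_iff]
    intro s hs
    simp only [decide_eq_true_eq]
    intro hsl
    exact pvFindStop_none L h s hsl hs
  rw [hf]; rfl

lemma pv_sorted_head (L : List String) (j : Nat) (h : pvFindStop L = some j) :
    ∃ t, PySem.List.sorted (pvIdxs L) (fun x => x) false = (j : Int) :: t := by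
  obtain ⟨hj, hmem, hfirst⟩ := pvFindStop_some L j h
  have hcL : L[j] ∈ L := List.getElem_mem hj
  have hidx : PySem.List.index? L L[j] = some j := by
    rw [PySem.List.index?_eq_some_iff]
    refine ⟨L.take j, L.drop (j + 1), ?_, by simp [List.length_take]; omega, ?_⟩
    · conv_lhs => rw [← List.take_append_drop j L]
      rw [List.drop_eq_getElem_cons hj]
    · intro hcpre
      obtain ⟨i, hi, hiv⟩ := List.getElem_of_mem hcpre
      have hilt : i < j := lt_of_lt_of_le hi (by simp [List.length_take])
      rw [List.getElem_take] at hiv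
      exact hfirst i hilt (hiv ▸ hmem)
  have hjmem : (j : Int) ∈ pvIdxs L := by
    rw [pvIdxs_eq]
    exact List.mem_map.mpr ⟨L[j], by simp [List.mem_filter, hmem, hcL], by simp only [PySem.List.index?_eq_idxOf?] at hidx; simp [hidx]⟩
  have hmin : ∀ x ∈ pvIdxs L, (j : Int) ≤ x := by
    rw [pvIdxs_eq]
    intro x hx
    obtain ⟨s, hs, rfl⟩ := List.mem_map.mp hx
    rw [List.mem_filter] at hs
    obtain ⟨hs1, hs2⟩ := hs
    simp only [decide_eq_true_eq] at hs2
    have hsome : ∃ k, PySem.List.index? L s = some k := by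
      have := (PySem.List.index?_isSome_iff (xs := L) (v := s)).mpr hs2
      exact Option.isSome_iff_exists.mp this
    obtain ⟨k, hk⟩ := hsome
    obtain ⟨hkl, hkv, _⟩ := PySem.List.getElem_of_index?_eq_some hk
    have hjk : j ≤ k := by
      by_contra hlt
      exact hfirst k (by omega) (hkv ▸ hs1)
    rw [hk]
    simpa using hjk
  have hne : pvIdxs L ≠ [] := fun h0 => by rw [h0] at hjmem; simp at hjmem
  cases hs : PySem.List.sorted (pvIdxs L) (fun x => x) false with
  | nil => exact absurd ((PySem.List.sorted_eq_nil_iff _ _ _).mp hs) hne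
  | cons m t =>
    have hm_le : ∀ y ∈ pvIdxs L, m ≤ y := by
      have := PySem.List.key_head_sorted_le (pvIdxs L) (fun x => x) hs
      simpa using this
    have hm_mem : m ∈ pvIdxs L := by
      have hperm := PySem.List.sorted_perm (xs := pvIdxs L) (key := fun x => x) (rev := false)
      exact hperm.mem_iff.mp (by rw [hs]; simp)
    have : m = (j : Int) := le_antisymm (hm_le _ hjmem) (hmin _ hm_mem)
    exact ⟨t, by rw [this]⟩

lemma pv_main (L : List String) :
    (match PySem.List.index? L "ATG" with
     | none => ""
     | some start =>
       if (PySem.List.sorted (pvIdxs L) (fun x => x) false).length ≥ 1 then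
         PySem.Str.join "" (PySem.List.slice L (some (start : Int))
           (some (PySem.List.pyGetD (PySem.List.sorted (pvIdxs L) (fun x => x) false) (0 : Int) 0)))
       else PySem.Str.join "" (PySem.List.slice L (some (start : Int)) none))
    = (match PySem.List.index? L "ATG" with
       | none => ""
       | some start =>
         match pvFindStop L with
         | some j => PySem.Str.join "" (PySem.List.slice L (some (start : Int)) (some (j : Int)))
         | none => PySem.Str.join "" (PySem.List.slice L (some (start : Int)) none)) := by
  cases PySem.List.index? L "ATG" with
  | none => rfl
  | some start =>
    cases hstop : pvFindStop L with
    | none =>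
      rw [pvIdxs_nil L hstop]
      simp [PySem.List.sorted]
    | some j =>
      obtain ⟨t, hsort⟩ := pv_sorted_head L j hstop
      rw [hsort]
      simp [PySem.List.pyGetD]

-- ===== VERDICT (by name: the statement is the Claim_ definition above) =====
theorem rest_of_ORF_spec : Claim_equal_rest_of_ORF := by
  intro dna _ _
  show rest_of_ORF dna = rest_of_ORF_alt dna
  unfold rest_of_ORF rest_of_ORF_alt
  have hOrf : (PySem.List.pyRange 0 (PySem.Str.len dna) 3).foldl
      (fun acc codon => acc ++ [PySem.Str.slice dna (some (0 + codon)) (some (3 + codon))]) []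
      = (PySem.List.pyRange 0 (PySem.Str.len dna) 3).map
        (fun i => PySem.Str.slice dna (some i) (some (i + 3))) := by
    rw [pv_foldl_push]
    simp only [List.nil_append]
    exact List.map_congr_left (fun i _ => by rw [zero_add, add_comm])
  rw [hOrf]
  exact pv_main _
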